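-- pv_equiv track=rewrite | github.com/pauloabaia/DES | remetente.py | gerarChavesparaoDes
-- ===== SOURCE A (Python) =====
-- import string
--
-- def gerarChavesparaoDes(p, q, a):
--     '''
--     Esta função gera uma chave de comprimento suficiente para o algoritmo DES,
--     utilizando a chave compartilhada formada e os parâmetros globais (p e q).
--     '''
--     # Mapeamento de caracteres ASCII para os valores da chave
--     mapping = {}
--     for index, letter in enumerate(string.ascii_letters):
--         mapping[index] = letter
--
--     # Multiplica os valores para formar uma string base para gerar a chave
--     val = str(a * p * q)
--
--     # Converte para uma chave de caracteres a partir do mapeamento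
--     finalKey = []
--     for index in range(0, len(val), 2):
--         finalKey.append(mapping[int(val[index:index + 1]) % len(mapping)])
--
--     # Garante que a chave tenha pelo menos 8 caracteres
--     while len(finalKey) < 8:
--         finalKey += finalKey
--
--     # Retorna a chave final com tamanho apropriado
--     return "".join(finalKey[:8])
-- ===== SOURCE B (Python) =====
-- import string
--
-- def gerarChavesparaoDes(p, q, a):
--     '''Same key, computed purely arithmetically: no str() conversion at all.
--     Count the decimal digits of n = a*p*q, then pull the digits that sit at
--     even positions of the decimal writing directly out of n by repeated
--     division by 100 (starting from n or n//10 depending on digit-count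
--     parity), map them to letters, and replicate-truncate to 8 chars.'''
--     n = a * p * q
--     # number of decimal digits of n (for n >= 0)
--     d, t = 1, n
--     while t >= 10:
--         t //= 10
--         d += 1
--     # digits at even positions of str(n), least-significant first
--     m = n if d % 2 == 1 else n // 10
--     digs = []
--     while m > 0:
--         digs.append(m % 10)
--         m //= 100
--     if not digs:
--         digs = [0]
--     base = [string.ascii_letters[dg] for dg in reversed(digs)]
--     return "".join((base * 8)[:8])
-- ===== Notes on version B (the rewrite author's own statement) =====
-- stated objective: alternative
-- what changed: B never builds the decimal string: it counts the digits of a*p*q arithmetically, extracts the even-position digits directly by repeated division by 100 (offset by the digit-count parity), indexes string.ascii_letters with them, and replicates-truncates the letter list to 8 chars, replacing A's str()+step-2 slicing, index->letter dict and grow-and-truncate doubling loop.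
import Mathlib
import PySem

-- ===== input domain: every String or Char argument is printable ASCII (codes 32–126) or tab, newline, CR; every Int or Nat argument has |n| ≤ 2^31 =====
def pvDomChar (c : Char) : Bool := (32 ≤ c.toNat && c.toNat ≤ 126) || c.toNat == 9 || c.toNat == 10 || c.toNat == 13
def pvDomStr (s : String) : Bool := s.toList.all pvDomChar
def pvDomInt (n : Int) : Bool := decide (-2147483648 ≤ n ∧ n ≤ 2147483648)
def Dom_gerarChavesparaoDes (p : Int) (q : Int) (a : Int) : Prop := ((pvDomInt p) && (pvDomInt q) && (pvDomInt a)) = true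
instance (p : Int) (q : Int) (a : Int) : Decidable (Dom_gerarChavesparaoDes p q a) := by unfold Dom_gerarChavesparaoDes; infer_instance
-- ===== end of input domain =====

-- B computes the key purely arithmetically (digit count + repeated division by 100) with no
-- string conversion, replacing A's str()+dict+doubling loop.


-- string.ascii_letters (shared module constant)
def pvAsciiLetters : List Char := "abcdefghijklmnopqrstuvwxyzABCDEFGHIJKLMNOPQRSTUVWXYZ".toList

-- ===== PORT A =====
-- 'for index, letter in enumerate(string.ascii_letters): mapping[index] = letter'
def pvMapping : PySem.Dict Int Char :=
  (PySem.List.enumerate pvAsciiLetters).foldl (fun d iv => d.insert iv.1 iv.2) PySem.Dict.empty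

-- 'while len(finalKey) < 8: finalKey += finalKey' — fuel 8 only makes the loop total;
-- it is never exhausted since the list is nonempty on admitted inputs.
def pvGrowA : Nat → List Char → List Char
  | 0, l => l
  | fuel+1, l => if l.length < 8 then pvGrowA fuel (l ++ l) else l

def gerarChavesparaoDes (p : Int) (q : Int) (a : Int) : String :=
  let val : List Char := PySem.Int.toChars (a * p * q)
  let finalKey : List Char :=
    (PySem.List.pyRange 0 (PySem.List.len val) 2).foldl
      (fun acc i =>
        acc ++ [PySem.Dict.getD pvMapping
          (PySem.Int.mod ((PySem.Int.ofChars? (PySem.List.slice val (some i) (some (i + 1)))).getD 0)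
            (pvMapping.size : Int)) 'a']) []
  let grown := pvGrowA 8 finalKey
  String.mk (PySem.List.slice grown none (some 8))

-- ===== PORT B =====
-- 'd, t = 1, n; while t >= 10: t //= 10; d += 1' — fuel 100 only makes the loop total;
-- it is never exhausted: t loses a decimal digit per step and |a*p*q| < 10^100 on Dom.
def pvCountD : Nat → Int → Int → Int
  | 0, _, d => d
  | fuel+1, t, d => if 10 ≤ t then pvCountD fuel (PySem.Int.floordiv t 10) (d + 1) else d

-- 'while m > 0: digs.append(m % 10); m //= 100' — fuel 100 likewise never exhausted on Dom.
def pvDigsB : Nat → Int → List Int → List Int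
  | 0, _, acc => acc
  | fuel+1, m, acc =>
    if 0 < m then pvDigsB fuel (PySem.Int.floordiv m 100) (acc ++ [PySem.Int.mod m 10]) else acc

-- 'string.ascii_letters[dg]' (dg is a digit 0..9 on every reachable input; .getD covers totality)
def pvLetter (dg : Int) : Char := (PySem.List.pyGet? pvAsciiLetters dg).getD 'a'

def gerarChavesparaoDes_alt (p : Int) (q : Int) (a : Int) : String :=
  let n := a * p * q
  let d := pvCountD 100 n 1
  let m := if PySem.Int.mod d 2 = 1 then n else PySem.Int.floordiv n 10
  let digs0 := pvDigsB 100 m []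
  let digs := if digs0 = [] then [(0 : Int)] else digs0
  let base := digs.reverse.map pvLetter
  String.mk (PySem.List.slice ((List.replicate 8 base).flatten) none (some 8))

-- ===== PRECONDITION & SPEC =====
-- Pre_ excludes a*p*q < 0: there str(a*p*q) starts with '-' and A raises ValueError at int('-').
def Pre_gerarChavesparaoDes (p : Int) (q : Int) (a : Int) : Prop := 0 ≤ a * p * q
instance (p : Int) (q : Int) (a : Int) : Decidable (Pre_gerarChavesparaoDes p q a) := by
  unfold Pre_gerarChavesparaoDes; infer_instance
def pvWitness_gerarChavesparaoDes : Int × Int × Int := (2, 3, 7)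

def Spec_gerarChavesparaoDes (p : Int) (q : Int) (a : Int) (out : String) : Prop := out = gerarChavesparaoDes_alt p q a
instance (p : Int) (q : Int) (a : Int) (out : String) : Decidable (Spec_gerarChavesparaoDes p q a out) := by unfold Spec_gerarChavesparaoDes; infer_instance

-- ===== CLAIM (what is proved, stated in full; the proofs are below) =====
def Claim_equal_gerarChavesparaoDes : Prop := ∀ (p : Int) (q : Int) (a : Int), Dom_gerarChavesparaoDes p q a → Pre_gerarChavesparaoDes p q a → Spec_gerarChavesparaoDes p q a (gerarChavesparaoDes p q a)

-- ===== LEMMAS AND PROOFS =====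

-- the two programs look a digit up the same way: A via the dict on the digit's character, B by direct indexing
set_option maxRecDepth 8192 in
lemma pv_dict_eq (dg : Nat) (h : dg < 10) :
    PySem.Dict.getD pvMapping
      (PySem.Int.mod ((PySem.Int.ofChars? [Nat.digitChar dg]).getD 0) (pvMapping.size : Int)) 'a'
    = pvLetter (dg : Int) := by
  interval_cases dg <;> decide

-- A's per-even-index fold is the map over even string indices
lemma pvA_canon (cs : List Char) :
    (PySem.List.pyRange 0 (PySem.List.len cs) 2).foldl
      (fun acc i =>
        acc ++ [PySem.Dict.getD pvMapping
          (PySem.Int.mod ((PySem.Int.ofChars? (PySem.List.slice cs (some i) (some (i + 1)))).getD 0)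
            (pvMapping.size : Int)) 'a']) []
    = (List.range ((cs.length + 1) / 2)).map
        (fun k => PySem.Dict.getD pvMapping
          (PySem.Int.mod ((PySem.Int.ofChars? [cs.getD (2 * k) ' ']).getD 0) (pvMapping.size : Int)) 'a') := by
  rw [PySem.List.foldl_append_singleton_eq_map
      (f := fun i => PySem.Dict.getD pvMapping
        (PySem.Int.mod ((PySem.Int.ofChars? (PySem.List.slice cs (some i) (some (i + 1)))).getD 0)
          (pvMapping.size : Int)) 'a')]
  rw [List.nil_append, PySem.List.len_eq, PySem.List.pyRange_of_pos 0 (cs.length : Int) (by norm_num)]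
  have hN : (if (0:Int) < (cs.length:Int) then (((cs.length:Int) - 0 + 2 - 1)/2).toNat else 0)
      = (cs.length + 1) / 2 := by
    split_ifs with h
    · rw [show ((cs.length:Int) - 0 + 2 - 1) = ((cs.length + 1 : Nat) : Int) by push_cast; ring,
        show (2:Int) = ((2:Nat):Int) from rfl, Int.ofNat_ediv_ofNat]
      exact Int.toNat_natCast _
    · have h0 : cs.length = 0 := by omega
      simp [h0]
  rw [hN, List.map_map]
  apply List.map_congr_left
  intro k hk
  have hkN : k < (cs.length + 1) / 2 := List.mem_range.mp hk
  have h2k : 2 * k < cs.length := by omega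
  simp only [Function.comp]
  rw [show (0 : Int) + 2 * (k:Int) = ((2*k : Nat) : Int) by push_cast; ring,
    show ((2*k : Nat) : Int) + 1 = ((2*k : Nat) : Int) + ((1:Nat) : Int) by norm_num,
    PySem.List.slice_natCast_add, List.take_one_drop_eq_of_lt_length h2k]
  simp only [List.get_eq_getElem]
  rw [List.getD_eq_getElem cs ' ' h2k]

-- `pvEveryOther l` = the elements of `l` at even positions
def pvEveryOther {α : Type} : List α → List α
  | [] => []
  | [x] => [x]
  | x :: _ :: r => x :: pvEveryOther r

lemma pvEO_length {α : Type} (l : List α) : (pvEveryOther l).length = (l.length + 1) / 2 := by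
  induction l using pvEveryOther.induct <;> simp [pvEveryOther, *] <;> omega

lemma pvEO_getElem? {α : Type} (l : List α) (k : Nat) : (pvEveryOther l)[k]? = l[2 * k]? := by
  induction l using pvEveryOther.induct generalizing k with
  | case1 => simp [pvEveryOther]
  | case2 x =>
      match k with
      | 0 => simp [pvEveryOther]
      | k+1 => simp [pvEveryOther]
  | case3 x y r ih =>
      match k with
      | 0 => simp [pvEveryOther]
      | k+1 =>
          have : 2 * (k + 1) = (2 * k) + 1 + 1 := by ring
          simp [pvEveryOther, this, ih]

lemma pvEO_mem {α : Type} (l : List α) (x : α) (h : x ∈ pvEveryOther l) : x ∈ l := by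
  induction l using pvEveryOther.induct with
  | case1 => simpa [pvEveryOther] using h
  | case2 y => simpa [pvEveryOther] using h
  | case3 y z r ih =>
      rcases List.mem_cons.mp (by simpa [pvEveryOther] using h) with rfl | h'
      · exact List.mem_cons_self
      · exact List.mem_cons_of_mem _ (List.mem_cons_of_mem _ (ih h'))

lemma pvEO_map {α β : Type} (f : α → β) (l : List α) :
    pvEveryOther (l.map f) = (pvEveryOther l).map f := by
  induction l using pvEveryOther.induct <;> simp [pvEveryOther, *]

-- even positions of the reverse = reverse of the even/odd positions (by length parity)
lemma pvEO_reverse {α : Type} (l : List α) :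
    pvEveryOther l.reverse
      = (pvEveryOther (l.drop (if l.length % 2 = 1 then 0 else 1))).reverse := by
  set p0 := if l.length % 2 = 1 then 0 else 1 with hp0
  have hp : (p0 = 0 ∧ l.length % 2 = 1) ∨ (p0 = 1 ∧ l.length % 2 = 0) := by
    rw [hp0]; split_ifs with h
    · exact Or.inl ⟨rfl, h⟩
    · exact Or.inr ⟨rfl, by omega⟩
  have hE : (pvEveryOther (l.drop p0)).length = (l.length + 1) / 2 := by
    rw [pvEO_length, List.length_drop]; omega
  apply List.ext_getElem?
  intro k
  rw [pvEO_getElem?]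
  by_cases hk : k < (l.length + 1) / 2
  · have h2k : 2 * k < l.length := by omega
    rw [List.getElem?_reverse (by omega), List.getElem?_reverse (by omega), hE,
      pvEO_getElem?, List.getElem?_drop]
    congr 1
    omega
  · rw [List.getElem?_eq_none (by simp; omega), List.getElem?_eq_none (by simp [hE]; omega)]

-- map over even indices via range = map over pvEveryOther
lemma pv_rangeMap_eq_EO {α : Type} [Inhabited α] (l : List α) (dflt : α) :
    (List.range ((l.length + 1) / 2)).map (fun k => l.getD (2 * k) dflt) = pvEveryOther l := by
  apply List.ext_getElem?
  intro k
  rw [pvEO_getElem?]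
  by_cases hk : k < (l.length + 1) / 2
  · have h2k : 2 * k < l.length := by omega
    rw [List.getElem?_map, List.getElem?_range hk]
    simp [List.getD_eq_getElem?_getD, List.getElem?_eq_getElem h2k]
  · rw [List.getElem?_eq_none (by simp; omega), List.getElem?_eq_none (by omega)]

lemma pv_mapEO (cs : List Char) (g : Char → Char) :
    (List.range ((cs.length + 1) / 2)).map (fun k => g (cs.getD (2 * k) ' '))
      = (pvEveryOther cs).map g := by
  rw [← pv_rangeMap_eq_EO cs ' ', List.map_map]
  simp [Function.comp]

-- bridge: Nat.toDigits is the reversed digit list rendered as chars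
lemma pv_core_eq : ∀ (f N : Nat) (acc : List Char), 0 < N → N < f →
    Nat.toDigitsCore 10 f N acc = ((Nat.digits 10 N).map Nat.digitChar).reverse ++ acc := by
  intro f
  induction f with
  | zero => intro N acc h0 hf; omega
  | succ f ih =>
    intro N acc h0 hf
    simp only [Nat.toDigitsCore]
    split
    · next h =>
      have hdig : Nat.digits 10 N = [N % 10] := by
        rw [Nat.digits_def' (by norm_num : 1 < 10) h0, h]
        simp
      simp [hdig]
    · next h =>
      have hpos : 0 < N / 10 := Nat.pos_of_ne_zero h
      rw [ih (N / 10) _ hpos (by omega)]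
      rw [Nat.digits_def' (by norm_num : 1 < 10) h0]
      simp

lemma pv_toDigits_eq (N : Nat) :
    Nat.toDigits 10 N = ((if N = 0 then [0] else Nat.digits 10 N).map Nat.digitChar).reverse := by
  by_cases h : N = 0
  · subst h; decide
  · rw [if_neg h]
    exact pv_core_eq (N + 1) N [] (Nat.pos_of_ne_zero h) (by omega) |>.trans (by simp)

-- B's digit-count loop
lemma pv_countD_spec : ∀ (fuel : Nat) (t d : Int), 0 ≤ t → t.toNat < 10 ^ fuel →
    pvCountD fuel t d = d - 1 + (max 1 (Nat.digits 10 t.toNat).length : Nat) := by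
  intro fuel
  induction fuel with
  | zero =>
    intro t d h0 hf
    have ht : t.toNat = 0 := by simpa using hf
    simp [pvCountD, ht]
  | succ fuel ih =>
    intro t d h0 hf
    simp only [pvCountD]
    split_ifs with h10
    · rw [PySem.Int.floordiv_eq_ediv_of_pos (by norm_num)]
      have hpow : (10:Nat) ^ (fuel + 1) = 10 ^ fuel * 10 := pow_succ 10 fuel
      rw [ih (t / 10) (d + 1) (by omega) (by omega)]
      have ht : (t / 10).toNat = t.toNat / 10 := by omega
      have hd : Nat.digits 10 t.toNat = t.toNat % 10 :: Nat.digits 10 (t.toNat / 10) :=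
        Nat.digits_def' (by norm_num : 1 < 10) (by omega)
      have hne : Nat.digits 10 (t.toNat / 10) ≠ [] :=
        Nat.digits_ne_nil_iff_ne_zero.mpr (by omega)
      have h1 : 0 < (Nat.digits 10 (t.toNat / 10)).length := List.length_pos_of_ne_nil hne
      rw [ht, hd]
      simp only [List.length_cons]
      omega
    · rcases Nat.eq_zero_or_pos t.toNat with h | h
      · simp [h]
      · have hdig : Nat.digits 10 t.toNat = [t.toNat % 10] := by
          rw [Nat.digits_def' (by norm_num : 1 < 10) h,
            show t.toNat / 10 = 0 by omega]
          simp
        rw [hdig]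
        simp

-- B's digit-extraction loop
lemma pv_digsB_spec : ∀ (fuel : Nat) (m : Int) (acc : List Int), m.toNat < 100 ^ fuel →
    pvDigsB fuel m acc = acc ++ (pvEveryOther (Nat.digits 10 m.toNat)).map (fun x => (x : Int)) := by
  intro fuel
  induction fuel with
  | zero =>
    intro m acc hf
    have hm : m.toNat = 0 := by simpa using hf
    simp [pvDigsB, hm, pvEveryOther]
  | succ fuel ih =>
    intro m acc hf
    simp only [pvDigsB]
    split_ifs with h0
    · rw [PySem.Int.floordiv_eq_ediv_of_pos (by norm_num)]
      have hpow : (100:Nat) ^ (fuel + 1) = 100 ^ fuel * 100 := pow_succ 100 fuel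
      rw [ih (m / 100) _ (by omega)]
      have hm : PySem.Int.mod m 10 = ((m.toNat % 10 : Nat) : Int) := by
        rw [PySem.Int.mod_eq_emod_of_pos (by norm_num)]; omega
      have hdiv : (m / 100).toNat = m.toNat / 100 := by omega
      have key : pvEveryOther (Nat.digits 10 m.toNat)
          = m.toNat % 10 :: pvEveryOther (Nat.digits 10 (m.toNat / 100)) := by
        by_cases h10 : m.toNat < 10
        · rw [Nat.digits_def' (by norm_num : 1 < 10) (by omega),
            show m.toNat / 10 = 0 by omega, show m.toNat / 100 = 0 by omega]
          simp [pvEveryOther]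
        · rw [Nat.digits_def' (by norm_num : 1 < 10) (by omega),
            Nat.digits_def' (by norm_num : 1 < 10) (show 0 < m.toNat / 10 by omega),
            Nat.div_div_eq_div_mul]
          simp [pvEveryOther]
      rw [hm, hdiv, key, List.append_assoc]
      simp
    · have hm : m.toNat = 0 := by omega
      simp [hm, pvEveryOther]

lemma pv_flatten_double (m : Nat) (l : List Char) :
    (List.replicate m (l ++ l)).flatten = (List.replicate (2*m) l).flatten := by
  induction m with
  | zero => rfl
  | succ m ih =>
    rw [show 2*(m+1) = (2*m)+1+1 by ring]
    simp [List.replicate_succ, ih]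

lemma pv_growA_flatten : ∀ (f : Nat) (l : List Char), ∃ m : Nat, 0 < m ∧ pvGrowA f l = (List.replicate m l).flatten := by
  intro f
  induction f with
  | zero => intro l; exact ⟨1, one_pos, by simp [pvGrowA]⟩
  | succ f ih =>
    intro l
    by_cases h : l.length < 8
    · obtain ⟨m, hm, he⟩ := ih (l ++ l)
      exact ⟨2*m, by omega, by simp only [pvGrowA, if_pos h, he, pv_flatten_double]⟩
    · exact ⟨1, one_pos, by simp [pvGrowA, h]⟩

lemma pv_growA_len : ∀ (f : Nat) (l : List Char), 8 ≤ 2^f * l.length → 8 ≤ (pvGrowA f l).length := by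
  intro f
  induction f with
  | zero => intro l h; simpa [pvGrowA] using h
  | succ f ih =>
    intro l h
    by_cases hl : l.length < 8
    · simp only [pvGrowA, if_pos hl]
      refine ih _ ?_
      have : 2^f * (l ++ l).length = 2^(f+1) * l.length := by
        simp [List.length_append]; ring
      omega
    · simp only [pvGrowA, if_neg hl]; omega

lemma pv_flatten_len (m : Nat) (l : List Char) : ((List.replicate m l).flatten).length = m * l.length := by
  simp [List.length_flatten, List.map_replicate, List.sum_replicate, smul_eq_mul]

lemma pv_flatten_getElem? : ∀ (m : Nat) (l : List Char) (i : Nat), i < m * l.length →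
    ((List.replicate m l).flatten)[i]? = l[i % l.length]? := by
  intro m
  induction m with
  | zero => intro l i h; omega
  | succ m ih =>
    intro l i h
    rw [Nat.succ_mul] at h
    simp only [List.replicate_succ, List.flatten_cons]
    by_cases hi : i < l.length
    · rw [List.getElem?_append_left hi, Nat.mod_eq_of_lt hi]
    · rw [List.getElem?_append_right (le_of_not_gt hi),
        ih l (i - l.length) (by omega),
        Nat.mod_eq_sub_mod (le_of_not_gt hi)]

lemma pv_take8 (l : List Char) (hl : l ≠ []) :
    (pvGrowA 8 l).take 8 = (List.range 8).map (fun k => l.getD (k % l.length) 'a') := by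
  obtain ⟨m, hm, he⟩ := pv_growA_flatten 8 l
  have hlp : 0 < l.length := List.length_pos_of_ne_nil hl
  have h8 : 8 ≤ (pvGrowA 8 l).length := pv_growA_len 8 l (by norm_num; omega)
  have hlen : (pvGrowA 8 l).length = m * l.length := by rw [he, pv_flatten_len]
  apply List.ext_getElem?
  intro i
  by_cases hi : i < 8
  · rw [List.getElem?_take_of_lt hi, he, pv_flatten_getElem? m l i (by omega)]
    have him : i % l.length < l.length := Nat.mod_lt _ hlp
    rw [List.getElem?_eq_getElem him, List.getElem?_map, List.getElem?_range hi]
    simp [List.getD, List.getElem?_eq_getElem him]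
  · rw [List.getElem?_eq_none (by simp; omega), List.getElem?_eq_none (by simp; omega)]

lemma pv_flat8_take (l : List Char) (hl : l ≠ []) :
    ((List.replicate 8 l).flatten).take 8 = (List.range 8).map (fun k => l.getD (k % l.length) 'a') := by
  have hlp : 0 < l.length := List.length_pos_of_ne_nil hl
  apply List.ext_getElem?
  intro i
  by_cases hi : i < 8
  · rw [List.getElem?_take_of_lt hi, pv_flatten_getElem? 8 l i (by omega)]
    have him : i % l.length < l.length := Nat.mod_lt _ hlp
    rw [List.getElem?_eq_getElem him, List.getElem?_map, List.getElem?_range hi]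
    simp [List.getD, List.getElem?_eq_getElem him]
  · rw [List.getElem?_eq_none (by simp [pv_flatten_len]; omega),
      List.getElem?_eq_none (by simp; omega)]

lemma pv_flatMap_cast (l : List Nat) :
    List.flatMap (fun (a : Nat) => [(a : Int)]) l = List.map (fun (x : Nat) => (x : Int)) l := by
  induction l with
  | nil => rfl
  | cons x xs ih => simpa using ih

-- ===== VERDICT (by name: the statement is the Claim_ definition above) =====
set_option maxRecDepth 16384 in
theorem gerarChavesparaoDes_spec : Claim_equal_gerarChavesparaoDes := by
  unfold Claim_equal_gerarChavesparaoDes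
  intro p q a hdom hpre
  unfold Pre_gerarChavesparaoDes at hpre
  unfold Dom_gerarChavesparaoDes at hdom
  simp only [pvDomInt, Bool.and_eq_true, decide_eq_true_eq] at hdom
  obtain ⟨⟨⟨hp1, hp2⟩, hq1, hq2⟩, ha1, ha2⟩ := hdom
  set n := a * p * q with hn
  have hA : |a| ≤ 2147483648 := abs_le.mpr ⟨ha1, ha2⟩
  have hP : |p| ≤ 2147483648 := abs_le.mpr ⟨hp1, hp2⟩
  have hQ : |q| ≤ 2147483648 := abs_le.mpr ⟨hq1, hq2⟩
  have s1 : |a| * |p| ≤ 2147483648 * 2147483648 :=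
    mul_le_mul hA hP (abs_nonneg p) (by norm_num)
  have habs : n ≤ 2147483648 * 2147483648 * 2147483648 := by
    calc n ≤ |a * p * q| := le_abs_self _
    _ = |a| * |p| * |q| := by rw [abs_mul, abs_mul]
    _ ≤ 2147483648 * 2147483648 * 2147483648 :=
        mul_le_mul s1 hQ (abs_nonneg q) (by positivity)
  have hlt : (2147483648 : Int) * 2147483648 * 2147483648 < 10 ^ 100 := by norm_num
  have hcast : ((10 ^ 100 : Nat) : Int) = (10 : Int) ^ 100 := by push_cast
  have hNb : n.toNat < 10 ^ 100 := by omega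
  have hNb' : n.toNat < 100 ^ 100 :=
    lt_of_lt_of_le hNb (Nat.pow_le_pow_left (by norm_num) 100)
  set N := n.toNat with hN
  set L0 : List Nat := if N = 0 then [0] else Nat.digits 10 N with hL0
  set p0 : Nat := if L0.length % 2 = 1 then 0 else 1 with hp0
  have hL0len : 1 ≤ L0.length := by
    rw [hL0]; split_ifs with h
    · simp
    · exact List.length_pos_of_ne_nil (Nat.digits_ne_nil_iff_ne_zero.mpr h)
  have hL0lt : ∀ x ∈ L0, x < 10 := by
    intro x hx
    rw [hL0] at hx; split_ifs at hx with h
    · simp at hx; omega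
    · exact Nat.digits_lt_base (by norm_num) hx
  have hsmall : N < 10 → L0.length = 1 := by
    intro h10
    rw [hL0]; split_ifs with h
    · simp
    · rw [Nat.digits_def' (by norm_num : 1 < 10) (by omega),
        show N / 10 = 0 by omega]
      simp
  have hval : PySem.Int.toChars n = (L0.map Nat.digitChar).reverse := by
    unfold PySem.Int.toChars
    rw [if_neg (by omega), ← hN, pv_toDigits_eq, ← hL0]
  -- the common even-position digit list
  set E : List Nat := pvEveryOther (L0.drop p0) with hE
  have hElen : E.length = (L0.length + 1) / 2 := by
    rw [hE, pvEO_length, List.length_drop]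
    rw [hp0]; split_ifs with h <;> omega
  have hEmem : ∀ x ∈ E, x < 10 := by
    intro x hx
    exact hL0lt x (List.mem_of_mem_drop (pvEO_mem _ _ hx))
  -- B's digit list equals E (as Ints)
  have hdval : pvCountD 100 n 1 = (L0.length : Int) := by
    rw [pv_countD_spec 100 n 1 (by omega) hNb, ← hN, hL0]
    split_ifs with h
    · simp [h]
    · have h1 : 0 < (Nat.digits 10 N).length :=
        List.length_pos_of_ne_nil (Nat.digits_ne_nil_iff_ne_zero.mpr h)
      omega
  have hcond : (PySem.Int.mod (pvCountD 100 n 1) 2 = 1) ↔ (L0.length % 2 = 1) := by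
    rw [hdval, PySem.Int.mod_eq_emod_of_pos (by norm_num)]
    omega
  have hdigs :
      (if pvDigsB 100 (if PySem.Int.mod (pvCountD 100 n 1) 2 = 1 then n else PySem.Int.floordiv n 10) [] = []
        then [(0 : Int)]
        else pvDigsB 100 (if PySem.Int.mod (pvCountD 100 n 1) 2 = 1 then n else PySem.Int.floordiv n 10) [])
      = E.map (fun x : Nat => (x : Int)) := by
    by_cases hpar : L0.length % 2 = 1
    · rw [if_pos (hcond.mpr hpar)]
      have hd0 : pvDigsB 100 n [] = (pvEveryOther (Nat.digits 10 N)).map (fun x : Nat => (x : Int)) := by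
        rw [pv_digsB_spec 100 n [] (by omega), ← hN]
        simp
        exact pv_flatMap_cast _
      have hpz : p0 = 0 := by rw [hp0, if_pos hpar]
      by_cases hz : N = 0
      · have : Nat.digits 10 N = [] := by rw [hz]; simp
        rw [hd0, this, if_pos (by simp [pvEveryOther])]
        have : L0 = [0] := by rw [hL0, if_pos hz]
        rw [hE, hpz, this]
        simp [pvEveryOther]
      · have hA0 : L0 = Nat.digits 10 N := by rw [hL0, if_neg hz]
        have hne : Nat.digits 10 N ≠ [] := Nat.digits_ne_nil_iff_ne_zero.mpr hz
        have hlen : 0 < ((pvEveryOther (Nat.digits 10 N)).map (fun x : Nat => (x : Int))).length := by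
          rw [List.length_map, pvEO_length]
          have := List.length_pos_of_ne_nil hne
          omega
        rw [hd0, if_neg (List.ne_nil_of_length_pos hlen), hE, hpz, hA0]
        simp
    · rw [if_neg (fun h => hpar (hcond.mp h))]
      have hp1' : p0 = 1 := by rw [hp0, if_neg hpar]
      have h10 : 10 ≤ N := by
        by_contra h
        have := hsmall (by omega)
        omega
      have hz : N ≠ 0 := by omega
      have hA0 : L0 = Nat.digits 10 N := by rw [hL0, if_neg hz]
      have hfd : PySem.Int.floordiv n 10 = n / 10 :=
        PySem.Int.floordiv_eq_ediv_of_pos (by norm_num)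
      have htn : (n / 10).toNat = N / 10 := by omega
      have hdrop : L0.drop 1 = Nat.digits 10 (N / 10) := by
        rw [hA0, Nat.digits_def' (by norm_num : 1 < 10) (by omega)]
        simp
      have hd0 : pvDigsB 100 (PySem.Int.floordiv n 10) []
          = (pvEveryOther (Nat.digits 10 (N / 10))).map (fun x : Nat => (x : Int)) := by
        rw [hfd, pv_digsB_spec 100 (n / 10) [] (by omega), htn]
        simp
        exact pv_flatMap_cast _
      have hne : Nat.digits 10 (N / 10) ≠ [] := Nat.digits_ne_nil_iff_ne_zero.mpr (by omega)
      have hlen : 0 < ((pvEveryOther (Nat.digits 10 (N / 10))).map (fun x : Nat => (x : Int))).length := by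
        rw [List.length_map, pvEO_length]
        have := List.length_pos_of_ne_nil hne
        omega
      rw [hd0, if_neg (List.ne_nil_of_length_pos hlen), hE, hp1', hdrop]
  have hEne : E ≠ [] := by
    refine List.ne_nil_of_length_pos ?_
    rw [hElen]; omega
  -- now unfold both ports and rewrite
  unfold Spec_gerarChavesparaoDes
  simp only [gerarChavesparaoDes, gerarChavesparaoDes_alt]
  rw [← hn, hval, pvA_canon, hdigs]
  -- A's letter list over even positions = B's base list
  have hcanonA :
      (List.range (((L0.map Nat.digitChar).reverse.length + 1) / 2)).map
        (fun k => PySem.Dict.getD pvMapping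
          (PySem.Int.mod ((PySem.Int.ofChars? [((L0.map Nat.digitChar).reverse).getD (2 * k) ' ']).getD 0)
            (pvMapping.size : Int)) 'a')
      = E.reverse.map (fun x : Nat => pvLetter (x : Int)) := by
    rw [pv_mapEO ((L0.map Nat.digitChar).reverse)
          (fun c => PySem.Dict.getD pvMapping
            (PySem.Int.mod ((PySem.Int.ofChars? [c]).getD 0) (pvMapping.size : Int)) 'a')]
    rw [show (L0.map Nat.digitChar).reverse = L0.reverse.map Nat.digitChar by
      rw [List.map_reverse]]
    rw [pvEO_map, pvEO_reverse, ← hp0, ← hE, List.map_map]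
    apply List.map_congr_left
    intro x hx
    have hx10 : x < 10 := hEmem x (List.mem_reverse.mp hx)
    simpa [Function.comp] using pv_dict_eq x hx10
  rw [hcanonA]
  -- both tails produce the first 8 characters of the cyclic extension
  rw [show (E.map (fun x : Nat => (x : Int))).reverse.map pvLetter
      = E.reverse.map (fun x : Nat => pvLetter (x : Int)) by
    rw [← List.map_reverse, List.map_map]
    simp [Function.comp]]
  set B : List Char := E.reverse.map (fun x : Nat => pvLetter (x : Int)) with hB
  have hBne : B ≠ [] := by
    refine List.ne_nil_of_length_pos ?_
    rw [hB, List.length_map, List.length_reverse]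
    have := List.length_pos_of_ne_nil hEne
    omega
  rw [PySem.List.slice_to (pvGrowA 8 B) (b := 8) (by norm_num),
    PySem.List.slice_to ((List.replicate 8 B).flatten) (b := 8) (by norm_num),
    show Int.toNat 8 = 8 from rfl,
    pv_take8 B hBne, pv_flat8_take B hBne]
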